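-- pv_equiv track=rewrite | github.com/QuentinRa/onectf | jobs/utils/tampering.py | _php_octal
-- ===== SOURCE A (Python) =====
-- def _php_octal(word):
--     """
--     Dummy function.
--     Encode each word using octal and quote it.
--     """
--     encoded = ''
--     first_letter = True
--     had_letter = False
--     for letter in word:
--         if letter.isalpha():
--             if first_letter:
--                 encoded += '"'
--                 first_letter = False
--                 had_letter = True
--             encoded += "\\" + oct(ord(letter))
--         else:
--             if had_letter:
--                 encoded += '"'
--                 had_letter = False
--             encoded += letter
--     if had_letter:
--         encoded += '"'
--     return encoded.replace("\\0o", "\\")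
-- ===== SOURCE B (Python) =====
-- def _php_octal(word):
--     """
--     Run-based re-implementation: split the word into maximal alphabetic /
--     non-alphabetic runs; encode alphabetic runs as \\NNN octal escapes
--     (stripping oct()'s '0o' prefix directly, so no final .replace is needed),
--     wrap only the first alphabetic run in double quotes, copy other runs.
--     """
--     result = ''
--     quoted = False
--     i, n = 0, len(word)
--     while i < n:
--         alpha = word[i].isalpha()
--         j = i
--         while j < n and word[j].isalpha() == alpha:
--             j += 1
--         run = word[i:j]
--         if alpha:
--             enc = ''.join('\\' + oct(ord(c))[2:] for c in run)
--             result += enc if quoted else '"' + enc + '"'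
--             quoted = True
--         else:
--             result += run
--         i = j
--     return result
-- ===== Notes on version B (the rewrite author's own statement) =====
-- stated objective: alternative
-- what changed: B splits the word into maximal alphabetic/non-alphabetic runs and processes each run as a unit, quoting only the first alphabetic run via a single flag and stripping the octal prefix of each escape directly, instead of A's char-by-char loop with two interacting flags followed by a global string replace pass.
import Mathlib
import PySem

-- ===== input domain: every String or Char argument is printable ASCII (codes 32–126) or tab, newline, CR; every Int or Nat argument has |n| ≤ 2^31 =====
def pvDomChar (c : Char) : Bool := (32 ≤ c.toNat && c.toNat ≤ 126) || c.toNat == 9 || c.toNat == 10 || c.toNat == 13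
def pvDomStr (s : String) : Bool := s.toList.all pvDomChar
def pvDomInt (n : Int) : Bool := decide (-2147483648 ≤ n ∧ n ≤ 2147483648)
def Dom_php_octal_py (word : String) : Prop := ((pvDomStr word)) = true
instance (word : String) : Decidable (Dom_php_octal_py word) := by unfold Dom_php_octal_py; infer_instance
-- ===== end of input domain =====

-- B restructures A's per-character loop (two flags + a final global .replace) into a loop over
-- maximal alphabetic / non-alphabetic runs with a single 'quoted' flag and no replace pass.

-- ===== PORT A =====

-- octal digits of n, most significant first; `oct(n)` for n ≥ 0 is "0o" ++ these digits
-- (hand-ported: `oct` has no PySem primitive; exact for the nonnegative `ord` values used here)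
def pvOctDigits (n : Nat) : List Char :=
  if h : n < 8 then [Nat.digitChar n]
  else pvOctDigits (n / 8) ++ [Nat.digitChar (n % 8)]
  decreasing_by exact Nat.div_lt_self (by omega) (by omega)

def php_octal_py (word : String) : String :=
  let st := word.toList.foldl
    (fun (st : String × Bool × Bool) letter =>
      let encoded := st.1
      let first_letter := st.2.1
      let had_letter := st.2.2
      if PySem.Chars.isalpha letter then
        let (encoded, first_letter, had_letter) :=
          if first_letter then (encoded ++ "\"", false, true)
          else (encoded, first_letter, had_letter)
        (encoded ++ "\\" ++ ("0o" ++ String.ofList (pvOctDigits letter.toNat)),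
         first_letter, had_letter)
      else
        let (encoded, had_letter) :=
          if had_letter then (encoded ++ "\"", false) else (encoded, had_letter)
        (encoded ++ String.singleton letter, first_letter, had_letter))
    ("", true, false)
  let encoded := if st.2.2 then st.1 ++ "\"" else st.1
  PySem.Str.replace encoded "\\0o" "\\"

-- ===== PORT B =====

-- the inner `while j < n and word[j].isalpha() == alpha` scan: (run after i, rest)
def pvSplitRun (alpha : Bool) : List Char → List Char × List Char
  | [] => ([], [])
  | c :: cs =>
    if PySem.Chars.isalpha c = alpha then
      let pr := pvSplitRun alpha cs
      (c :: pr.1, pr.2)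
    else ([], c :: cs)

theorem pvSplitRun_snd_length (alpha : Bool) (l : List Char) :
    (pvSplitRun alpha l).2.length ≤ l.length := by
  induction l with
  | nil => simp [pvSplitRun]
  | cons c cs ih =>
    simp only [pvSplitRun]
    split
    · exact Nat.le_succ_of_le ih
    · exact Nat.le_refl _

-- `''.join('\\' + oct(ord(c))[2:] for c in run)`
def pvEncRun (run : List Char) : String :=
  String.join (run.map (fun c => "\\" ++ String.ofList (pvOctDigits c.toNat)))

-- the outer while loop of B, as recursion over the remaining characters
def pvGoB (quoted : Bool) (l : List Char) : String :=
  match l with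
  | [] => ""
  | c :: cs =>
    let alpha := PySem.Chars.isalpha c
    let pr := pvSplitRun alpha cs
    let piece :=
      if alpha then
        let enc := pvEncRun (c :: pr.1)
        if quoted then enc else "\"" ++ enc ++ "\""
      else String.ofList (c :: pr.1)
    piece ++ pvGoB (quoted || alpha) pr.2
  termination_by l.length
  decreasing_by
    exact Nat.lt_succ_of_le (pvSplitRun_snd_length _ _)

def php_octal_py_alt (word : String) : String := pvGoB false word.toList

-- ===== PRECONDITION & SPEC =====
def Spec_php_octal_py (word : String) (out : String) : Prop := out = php_octal_py_alt word
instance (word : String) (out : String) : Decidable (Spec_php_octal_py word out) := by unfold Spec_php_octal_py; infer_instance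

-- ===== CLAIM (what is proved, stated in full; the proofs are below) =====
def Claim_equal_php_octal_py : Prop := ∀ (word : String), Dom_php_octal_py word → Spec_php_octal_py word (php_octal_py word)

-- ===== LEMMAS AND PROOFS =====

-- ---- char-level model of A's loop ----

-- token A emits for one alphabetic character (before the final replace)
def pvTok (c : Char) : List Char := '\\' :: '0' :: 'o' :: pvOctDigits c.toNat

def pvTokL (run : List Char) : List Char := run.flatMap pvTok

-- token after the replace has eaten the "0o"
def pvEncL (run : List Char) : List Char :=
  run.flatMap (fun c => '\\' :: pvOctDigits c.toNat)

-- A's loop, producing the rest of `encoded` (incl. the trailing quote) from state (first, had)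
def pvFA (f h : Bool) : List Char → List Char
  | [] => if h then ['"'] else []
  | c :: cs =>
    if PySem.Chars.isalpha c then
      (if f then ['"'] else []) ++ pvTok c ++ pvFA false (f || h) cs
    else
      (if h then ['"'] else []) ++ c :: pvFA f false cs

-- ---- char-level model of the replace("\0o", "\") ----

def pvRep : List Char → List Char
  | [] => []
  | c :: t =>
    if ['\\', '0', 'o'].isPrefixOf (c :: t) then '\\' :: pvRep ((c :: t).drop 3)
    else c :: pvRep t
  termination_by l => l.length
  decreasing_by
    · simp only [List.drop_succ_cons, List.length_cons, List.length_drop]; omega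
    · simp

theorem pvRep_nil : pvRep [] = [] := by simp [pvRep]

theorem pvRep_cons_ne (c : Char) (t : List Char) (hc : c ≠ '\\') :
    pvRep (c :: t) = c :: pvRep t := by
  rw [pvRep]
  have : (['\\', '0', 'o'].isPrefixOf (c :: t)) = false := by
    simp [List.isPrefixOf]
    intro h; exact absurd h.symm hc
  simp [this]

theorem pvRep_tok (t : List Char) : pvRep ('\\' :: '0' :: 'o' :: t) = '\\' :: pvRep t := by
  rw [pvRep]
  simp [List.isPrefixOf]

theorem pvRep_bs (t : List Char) (h : ¬ ['0', 'o'].isPrefixOf t) :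
    pvRep ('\\' :: t) = '\\' :: pvRep t := by
  rw [pvRep]
  have : (['\\', '0', 'o'].isPrefixOf ('\\' :: t)) = false := by
    simp only [List.isPrefixOf, beq_self_eq_true, Bool.true_and]
    exact Bool.eq_false_iff.mpr (fun hh => h hh)
  match t with
  | [] => simp [this]
  | a :: t' => simp [this]

-- go with enough fuel computes pvRep
theorem pvGo_eq_pvRep (fuel : ℕ) :
    ∀ (l acc : List Char), l.length ≤ fuel →
      PySem.Chars.replace.go ['\\', '0', 'o'] ['\\'] fuel l acc = acc.reverse ++ pvRep l := by
  induction fuel with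
  | zero =>
    intro l acc hl
    have : l = [] := List.eq_nil_of_length_eq_zero (Nat.le_zero.mp hl)
    subst this
    simp [PySem.Chars.replace.go, pvRep_nil]
  | succ n ih =>
    intro l acc hl
    match l with
    | [] => simp [PySem.Chars.replace.go, pvRep_nil]
    | c :: t =>
      rw [PySem.Chars.replace.go]
      by_cases hp : List.isPrefixOf ['\\', '0', 'o'] (c :: t)
      · obtain ⟨s, hs⟩ := List.isPrefixOf_iff_prefix.mp hp
        simp only [hp, if_pos, if_true]
        rw [ih _ _ (by simp at hl ⊢; omega)]
        have hcons : c :: t = '\\' :: '0' :: 'o' :: s := by simpa using hs.symm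
        rw [hcons, pvRep_tok]
        simp
      · simp only [hp, if_neg, Bool.false_eq_true, if_false]
        rw [ih t (c :: acc) (by simpa using Nat.lt_succ_iff.mp (by simpa using hl))]
        rw [pvRep]
        simp only [hp, Bool.false_eq_true, if_false]
        simp
  termination_by fuel

theorem pvReplace_eq_pvRep (l : List Char) :
    PySem.Chars.replace l ['\\', '0', 'o'] ['\\'] = pvRep l := by
  rw [PySem.Chars.replace]
  simp only [List.isEmpty_cons, Bool.false_eq_true, if_false]
  simpa using pvGo_eq_pvRep l.length l [] (Nat.le_refl _)

-- ---- facts about characters and digits ----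

theorem pvOctDigits_oct (n : ℕ) : ∀ d ∈ pvOctDigits n, '0' ≤ d ∧ d ≤ '7' := by
  rw [pvOctDigits]
  split
  · rename_i h
    intro d hd
    simp at hd
    subst hd
    interval_cases n <;> simp [Nat.digitChar] <;> decide
  · rename_i h
    intro d hd
    simp only [List.mem_append, List.mem_singleton] at hd
    rcases hd with hd | hd
    · exact pvOctDigits_oct (n / 8) d hd
    · subst hd
      have h8 : n % 8 < 8 := Nat.mod_lt _ (by omega)
      set m := n % 8
      interval_cases m <;> simp [Nat.digitChar] <;> decide
  termination_by n
  decreasing_by exact Nat.div_lt_self (by omega) (by omega)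

theorem pvOctDigits_ne_bs (n : ℕ) (d : Char) (hd : d ∈ pvOctDigits n) : d ≠ '\\' := by
  obtain ⟨h1, h2⟩ := pvOctDigits_oct n d hd
  intro he; subst he
  exact absurd h2 (by decide)

-- ---- pushing pvRep through the pieces ----

theorem pvRep_push_safe (ds : List Char) (tail : List Char)
    (h : ∀ d ∈ ds, d ≠ '\\') : pvRep (ds ++ tail) = ds ++ pvRep tail := by
  induction ds with
  | nil => simp
  | cons d ds ih =>
    rw [List.cons_append, pvRep_cons_ne d _ (h d (List.mem_cons_self ..)),
        ih (fun x hx => h x (List.mem_cons_of_mem _ hx))]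
    simp

theorem pvRep_push_tok (run : List Char) (tail : List Char) :
    pvRep (pvTokL run ++ tail) = pvEncL run ++ pvRep tail := by
  induction run with
  | nil => simp [pvTokL, pvEncL]
  | cons c run ih =>
    show pvRep ((pvTok c ++ pvTokL run) ++ tail) = _
    rw [List.append_assoc]
    show pvRep ('\\' :: '0' :: 'o' :: (pvOctDigits c.toNat ++ (pvTokL run ++ tail))) = _
    rw [pvRep_tok, pvRep_push_safe _ _ (fun d hd => pvOctDigits_ne_bs _ d hd), ih]
    simp [pvEncL]

-- a string that is empty or starts with '"' or '\' cannot begin with "0o"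
def pvHeadSafe (l : List Char) : Prop :=
  l = [] ∨ ∃ t, l = '"' :: t ∨ l = '\\' :: t

theorem pvRep_push_nonalpha (run : List Char) (tail : List Char)
    (hrun : ∀ c ∈ run, PySem.Chars.isalpha c = false) (htail : pvHeadSafe tail) :
    pvRep (run ++ tail) = run ++ pvRep tail := by
  induction run with
  | nil => simp
  | cons c run ih =>
    have hc := hrun c (List.mem_cons_self ..)
    have ihr := ih (fun x hx => hrun x (List.mem_cons_of_mem _ hx))
    by_cases hbs : c = '\\'
    · subst hbs
      rw [List.cons_append, pvRep_bs, ihr, List.cons_append]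
      -- (run ++ tail) does not start with "0o": the char after a possible '0' is never 'o'
      intro hpre
      obtain ⟨s, hs⟩ := List.isPrefixOf_iff_prefix.mp hpre
      -- hs : ['0','o'] ++ s = run ++ tail
      cases run with
      | nil =>
        simp only [List.cons_append, List.nil_append] at hs
        rcases htail with h0 | ⟨t, ht | ht⟩
        · rw [h0] at hs; simp at hs
        · rw [ht] at hs; injection hs with h1 _; exact absurd h1 (by decide)
        · rw [ht] at hs; injection hs with h1 _; exact absurd h1 (by decide)
      | cons d run' =>
        cases run' with
        | nil =>
          simp only [List.cons_append, List.nil_append] at hs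
          injection hs with h1 h2
          rcases htail with h0 | ⟨t, ht | ht⟩
          · rw [h0] at h2; simp at h2
          · rw [ht] at h2; injection h2 with h3 _; exact absurd h3 (by decide)
          · rw [ht] at h2; injection h2 with h3 _; exact absurd h3 (by decide)
        | cons e run'' =>
          simp only [List.cons_append, List.nil_append] at hs
          injection hs with h1 h2
          injection h2 with h3 _
          have he := hrun e (by simp)
          rw [← h3] at he
          exact absurd he (by decide)
    · rw [List.cons_append, pvRep_cons_ne c _ hbs, ihr, List.cons_append]

-- ---- run decompositions of A's loop ----

theorem pvFA_nonalpha_run (f : Bool) : ∀ (l : List Char),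
    pvFA f false l = (pvSplitRun false l).1 ++ pvFA f false (pvSplitRun false l).2 := by
  intro l
  induction l with
  | nil => simp [pvSplitRun]
  | cons c cs ih =>
    by_cases hc : PySem.Chars.isalpha c
    · simp [pvSplitRun, hc]
    · simp only [pvSplitRun, hc, Bool.false_eq_true, if_true, if_neg]
      show pvFA f false (c :: cs) = _
      rw [pvFA]
      simp [hc, ih]

theorem pvFA_alpha_run_quoted : ∀ (l : List Char),
    pvFA false true l = pvTokL (pvSplitRun true l).1 ++ '"' :: pvFA false false (pvSplitRun true l).2 := by
  intro l
  induction l with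
  | nil => simp [pvSplitRun, pvFA, pvTokL]
  | cons c cs ih =>
    by_cases hc : PySem.Chars.isalpha c
    · simp only [pvSplitRun, hc, if_pos]
      rw [pvFA]
      simp only [hc, if_pos, if_true, Bool.false_or, Bool.or_true, if_false]
      rw [ih]
      simp [pvTokL]
    · simp only [pvSplitRun, hc]
      rw [pvFA]
      simp [hc, pvTokL, pvFA]

theorem pvFA_alpha_run_unquoted : ∀ (l : List Char),
    pvFA false false l = pvTokL (pvSplitRun true l).1 ++ pvFA false false (pvSplitRun true l).2 := by
  intro l
  induction l with
  | nil => simp [pvSplitRun, pvTokL]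
  | cons c cs ih =>
    by_cases hc : PySem.Chars.isalpha c
    · simp only [pvSplitRun, hc, if_pos]
      rw [pvFA]
      simp only [hc, if_pos, if_true, Bool.false_or, Bool.or_false, if_false]
      rw [ih]
      simp [pvTokL]
    · simp [pvSplitRun, hc, pvTokL]

theorem pvSplitRun_mem (alpha : Bool) (l : List Char) :
    ∀ c ∈ (pvSplitRun alpha l).1, PySem.Chars.isalpha c = alpha := by
  induction l with
  | nil => simp [pvSplitRun]
  | cons c cs ih =>
    simp only [pvSplitRun]
    split
    · rename_i h
      intro d hd
      simp only [List.mem_cons] at hd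
      rcases hd with hd | hd
      · subst hd; exact h
      · exact ih d hd
    · simp

theorem pvSplitRun_rest (alpha : Bool) (l : List Char) :
    (pvSplitRun alpha l).2 = [] ∨
      ∃ c cs, (pvSplitRun alpha l).2 = c :: cs ∧ PySem.Chars.isalpha c ≠ alpha := by
  induction l with
  | nil => simp [pvSplitRun]
  | cons c cs ih =>
    simp only [pvSplitRun]
    split
    · exact ih
    · rename_i h
      exact Or.inr ⟨c, cs, rfl, h⟩

theorem pvHeadSafe_pvFA (f : Bool) (l : List Char)
    (hl : l = [] ∨ ∃ c cs, l = c :: cs ∧ PySem.Chars.isalpha c = true) :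
    pvHeadSafe (pvFA f false l) := by
  rcases hl with h0 | ⟨c, cs, hcons, hc⟩
  · subst h0; left; simp [pvFA]
  · subst hcons
    rw [pvFA]
    simp only [hc, if_pos, if_true]
    cases f
    · right
      refine ⟨'0' :: 'o' :: (pvOctDigits c.toNat ++ pvFA false (false || false) cs), Or.inr ?_⟩
      simp [pvTok]
    · right
      refine ⟨pvTok c ++ pvFA false (true || false) cs, Or.inl ?_⟩
      simp

-- ---- toList bridges for B's port ----

theorem pvFoldAppend_toList (l : List String) : ∀ (s : String),
    (l.foldl (· ++ ·) s).toList = s.toList ++ (l.map String.toList).flatten := by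
  induction l with
  | nil => intro s; simp
  | cons a l ih =>
    intro s
    simp only [List.foldl_cons, List.map_cons, List.flatten_cons]
    rw [ih]
    simp [String.toList_append]

theorem pvEncRun_toList (run : List Char) : (pvEncRun run).toList = pvEncL run := by
  unfold pvEncRun
  show ((run.map (fun c => "\\" ++ String.ofList (pvOctDigits c.toNat))).foldl (· ++ ·) "").toList = _
  rw [pvFoldAppend_toList]
  simp only [List.map_map, show ("" : String).toList = [] from rfl, List.nil_append]
  unfold pvEncL
  induction run with
  | nil => simp
  | cons c run ih =>
    simp only [List.map_cons, List.flatten_cons, List.flatMap_cons, Function.comp_apply]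
    rw [ih]
    simp [String.toList_append]

-- ---- the main correspondence ----

theorem pvMain : ∀ (n : ℕ) (l : List Char), l.length ≤ n → ∀ (q : Bool),
    pvRep (pvFA (!q) false l) = (pvGoB q l).toList := by
  intro n
  induction n with
  | zero =>
    intro l hl q
    have : l = [] := List.eq_nil_of_length_eq_zero (Nat.le_zero.mp hl)
    subst this
    cases q <;> simp [pvFA, pvRep_nil, pvGoB]
  | succ n ih =>
    intro l hl q
    match l with
    | [] => cases q <;> simp [pvFA, pvRep_nil, pvGoB]
    | c :: cs =>
      have hcs : cs.length ≤ n := by simpa using Nat.lt_succ_iff.mp (by simpa using hl)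
      have hrest : (pvSplitRun (PySem.Chars.isalpha c) cs).2.length ≤ n :=
        le_trans (pvSplitRun_snd_length _ _) hcs
      by_cases hc : PySem.Chars.isalpha c
      · -- alphabetic run
        rw [pvGoB]
        simp only [hc]
        cases q
        · -- first alphabetic run: quoted
          rw [pvFA]
          simp only [hc, if_pos, Bool.not_false, if_true, Bool.true_or]
          rw [pvFA_alpha_run_quoted cs]
          have : (['"'] ++ pvTok c ++ (pvTokL (pvSplitRun true cs).1 ++
              '"' :: pvFA false false (pvSplitRun true cs).2))
              = '"' :: (pvTokL (c :: (pvSplitRun true cs).1) ++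
                ('"' :: pvFA false false (pvSplitRun true cs).2)) := by
            simp [pvTokL]
          rw [this, pvRep_cons_ne _ _ (by decide), pvRep_push_tok,
              pvRep_cons_ne _ _ (by decide)]
          have hIH := ih (pvSplitRun true cs).2 (by simpa [hc] using hrest) true
          simp only [Bool.not_true] at hIH
          rw [hIH]
          simp [String.toList_append, pvEncRun_toList, Bool.false_or]
        · -- later alphabetic run: unquoted
          have hdec : pvFA (!true) false (c :: cs)
              = pvTokL (c :: (pvSplitRun true cs).1) ++ pvFA false false (pvSplitRun true cs).2 := by
            have := pvFA_alpha_run_unquoted (c :: cs)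
            simpa [pvSplitRun, hc] using this
          rw [hdec, pvRep_push_tok]
          have hIH := ih (pvSplitRun true cs).2 (by simpa [hc] using hrest) true
          simp only [Bool.not_true] at hIH
          rw [hIH]
          simp [String.toList_append, pvEncRun_toList, Bool.true_or]
      · -- non-alphabetic run
        have hc' : PySem.Chars.isalpha c = false := by simpa using hc
        rw [pvGoB]
        simp only [hc']
        have hdec : pvFA (!q) false (c :: cs)
            = (c :: (pvSplitRun false cs).1) ++ pvFA (!q) false (pvSplitRun false cs).2 := by
          have := pvFA_nonalpha_run (!q) (c :: cs)
          simpa [pvSplitRun, hc'] using this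
        rw [hdec]
        have hmem : ∀ d ∈ c :: (pvSplitRun false cs).1, PySem.Chars.isalpha d = false := by
          intro d hd
          rcases List.mem_cons.mp hd with h | h
          · subst h; exact hc'
          · exact pvSplitRun_mem false cs d h
        have hsafe : pvHeadSafe (pvFA (!q) false (pvSplitRun false cs).2) := by
          apply pvHeadSafe_pvFA
          rcases pvSplitRun_rest false cs with h0 | ⟨d, ds, hds, hd⟩
          · exact Or.inl h0
          · exact Or.inr ⟨d, ds, hds, by simpa using hd⟩
        rw [pvRep_push_nonalpha _ _ hmem hsafe]
        have hIH := ih (pvSplitRun false cs).2 (by simpa [hc'] using hrest) q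
        rw [hIH]
        simp [String.toList_append, Bool.or_false]

-- ---- foldl bridge for A's port ----

theorem pvFoldA (l : List Char) : ∀ (f h : Bool) (acc : String),
    (let st := l.foldl
      (fun (st : String × Bool × Bool) letter =>
        let encoded := st.1
        let first_letter := st.2.1
        let had_letter := st.2.2
        if PySem.Chars.isalpha letter then
          let (encoded, first_letter, had_letter) :=
            if first_letter then (encoded ++ "\"", false, true)
            else (encoded, first_letter, had_letter)
          (encoded ++ "\\" ++ ("0o" ++ String.ofList (pvOctDigits letter.toNat)),
           first_letter, had_letter)
        else
          let (encoded, had_letter) :=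
            if had_letter then (encoded ++ "\"", false) else (encoded, had_letter)
          (encoded ++ String.singleton letter, first_letter, had_letter))
      (acc, f, h)
     (if st.2.2 then st.1 ++ "\"" else st.1).toList) = acc.toList ++ pvFA f h l := by
  induction l with
  | nil =>
    intro f h acc
    cases h <;> simp [pvFA, String.toList_append]
  | cons c cs ih =>
    intro f h acc
    simp only [List.foldl_cons]
    by_cases hc : PySem.Chars.isalpha c
    · cases f
      · simp only [hc, if_pos, Bool.false_eq_true, if_false, if_true]
        rw [ih]
        rw [pvFA]
        simp [hc, pvTok, String.toList_append]
      · simp only [hc, if_pos, if_true]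
        rw [ih]
        rw [pvFA]
        simp [hc, pvTok, String.toList_append]
    · have hc' : PySem.Chars.isalpha c = false := by simpa using hc
      cases h
      · simp only [hc', Bool.false_eq_true, if_false]
        rw [ih]
        rw [pvFA]
        simp [hc', String.toList_append]
      · simp only [hc', Bool.false_eq_true, if_false, if_true]
        rw [ih]
        rw [pvFA]
        simp [hc', String.toList_append]

-- ===== VERDICT (by name: the statement is the Claim_ definition above) =====
theorem php_octal_py_spec : Claim_equal_php_octal_py := by
  intro word _
  unfold Spec_php_octal_py
  rw [← String.toList_inj]
  unfold php_octal_py php_octal_py_alt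
  rw [PySem.Str.toList_replace]
  have hA := pvFoldA word.toList true false ""
  simp only at hA
  rw [hA]
  have hpat : ("\\0o" : String).toList = ['\\', '0', 'o'] := by decide
  have hrep : ("\\" : String).toList = ['\\'] := by decide
  rw [hpat, hrep, pvReplace_eq_pvRep]
  have := pvMain word.toList.length word.toList (Nat.le_refl _) false
  simpa using this
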